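-- pv_equiv track=rewrite | github.com/ShunaMae/CompetitiveProgramming | Daily_Practice/2023_11/2023_11_03/Algo_prime3_q4.py | divisors_sum
-- ===== SOURCE A (Python) =====
-- def divisors_sum(N):
--     res = []
--
--     for i in range(1, N+1):
--         if i * i > N:
--             break
--
--         if N % i != 0:
--             continue
--
--         res.append(N//i + i)
--
--
--     return min(res)
-- ===== SOURCE B (Python) =====
-- def divisors_sum(N):
--     i = 1
--     while i * i <= N:
--         i += 1
--     i -= 1          # i = floor(sqrt(N))
--     while N % i:
--         i -= 1      # first divisor below sqrt(N); the pair-sum is minimal there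
--     return i + N // i
-- ===== Notes on version B (the rewrite author's own statement) =====
-- stated objective: alternative
-- what changed: Instead of collecting every pair-sum i+N//i for divisors i up to sqrt(N) into a list and taking min, B computes floor(sqrt(N)) by an upward scan and then walks downward to the FIRST divisor d <= sqrt(N), returning d + N//d directly (the largest divisor below the root gives the minimal pair-sum), so no list and no min pass.
-- outside the precondition, e.g. on divisors_sum(0): A raises ValueError, B raises ZeroDivisionError
import Mathlib
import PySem

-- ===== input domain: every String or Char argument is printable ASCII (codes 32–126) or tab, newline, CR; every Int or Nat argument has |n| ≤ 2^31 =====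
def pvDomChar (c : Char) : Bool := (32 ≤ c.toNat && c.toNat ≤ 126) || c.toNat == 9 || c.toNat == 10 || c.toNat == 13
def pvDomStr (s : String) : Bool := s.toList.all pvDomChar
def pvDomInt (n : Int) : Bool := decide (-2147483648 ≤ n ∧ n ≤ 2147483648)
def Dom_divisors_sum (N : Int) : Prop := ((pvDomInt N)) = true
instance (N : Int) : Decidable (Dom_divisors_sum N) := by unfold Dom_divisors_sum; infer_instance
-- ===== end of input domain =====

-- B replaces A's collect-all-sums-then-min by a downward scan from floor(sqrt N) to the
-- first divisor, whose pair-sum is the minimum (alternative decomposition, no list, no min pass).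

-- ===== PORT A =====
-- A's for-loop over range(1, N+1) with break/continue, carried as fuel recursion
-- (fuel = number of remaining range elements); res is the accumulated list.
def loopAimpl (N : Int) : Nat → Int → List Int → List Int
  | 0, _, res => res
  | fuel+1, i, res =>
    if i * i > N then res
    else if PySem.Int.mod N i ≠ 0 then loopAimpl N fuel (i+1) res
    else loopAimpl N fuel (i+1) (res ++ [PySem.Int.floordiv N i + i])

def divisors_sum (N : Int) : Int :=
  (PySem.List.min? (loopAimpl N N.toNat 1 []) (fun x => x)).getD 0  -- min([]) raises: excluded by Pre_

-- ===== PORT B =====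
-- first while-loop of Source B: i climbs while i*i ≤ N
def loopUp (N : Int) : Nat → Int → Int
  | 0, i => i
  | fuel+1, i => if i * i ≤ N then loopUp N fuel (i+1) else i

-- second while-loop of Source B: i descends while N % i ≠ 0, then returns i + N//i
def loopDown (N : Int) : Nat → Int → Int
  | 0, _ => 0   -- unreachable under Pre_ (Python would divide by zero)
  | fuel+1, i => if PySem.Int.mod N i ≠ 0 then loopDown N fuel (i-1)
                 else i + PySem.Int.floordiv N i

def divisors_sum_alt (N : Int) : Int :=
  let i := loopUp N (N+1).toNat 1 - 1
  loopDown N i.toNat i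

-- ===== PRECONDITION & SPEC =====
-- A raises (min of an empty list) exactly when N ≤ 0; B also raises there (ZeroDivisionError).
def Pre_divisors_sum (N : Int) : Prop := 1 ≤ N
instance (N : Int) : Decidable (Pre_divisors_sum N) := by unfold Pre_divisors_sum; infer_instance
def pvWitness_divisors_sum : Int := 6

def Spec_divisors_sum (N : Int) (out : Int) : Prop := out = divisors_sum_alt N
instance (N : Int) (out : Int) : Decidable (Spec_divisors_sum N out) := by unfold Spec_divisors_sum; infer_instance

-- ===== CLAIM (what is proved, stated in full; the proofs are below) =====
def Claim_equal_divisors_sum : Prop := ∀ (N : Int), Dom_divisors_sum N → Pre_divisors_sum N → Spec_divisors_sum N (divisors_sum N)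

-- ===== LEMMAS AND PROOFS =====

-- squares are monotone on nonnegatives
theorem pv_sq_lt {a b N : Int} (ha : 0 ≤ a) (hb : 0 ≤ b) (h1 : a * a ≤ N) (h2 : N < b * b) :
    a < b := by nlinarith

-- loopUp returns the first index r ≥ i with r*r > N
theorem loopUp_spec (N : Int) : ∀ (fuel : Nat) (i : Int), 1 ≤ i → (N + 1 - i).toNat ≤ fuel →
    i ≤ loopUp N fuel i ∧ N < loopUp N fuel i * loopUp N fuel i ∧
      ∀ j, i ≤ j → j < loopUp N fuel i → j * j ≤ N := by
  intro fuel
  induction fuel with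
  | zero =>
    intro i hi hf
    have hNi : N < i := by omega
    simp only [loopUp]
    refine ⟨le_refl _, by nlinarith, ?_⟩
    intro j hj hj2; omega
  | succ fuel ih =>
    intro i hi hf
    simp only [loopUp]
    by_cases h : i * i ≤ N
    · have hiN : i ≤ N := by nlinarith
      have hrec := ih (i + 1) (by omega) (by omega)
      simp only [if_pos h]
      refine ⟨by omega, hrec.2.1, ?_⟩
      intro j hj hj2
      rcases eq_or_lt_of_le hj with rfl | hlt
      · exact h
      · exact hrec.2.2 j (by omega) hj2
    · simp only [if_neg h]
      refine ⟨le_refl _, by omega, ?_⟩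
      intro j hj hj2; omega

-- loopDown returns d + N//d at the largest divisor d ≤ i
theorem loopDown_spec (N : Int) : ∀ (fuel : Nat) (i : Int), 1 ≤ i → i.toNat ≤ fuel →
    ∃ d, loopDown N fuel i = d + PySem.Int.floordiv N d ∧ 1 ≤ d ∧ d ≤ i ∧ d ∣ N ∧
      ∀ e, d < e → e ≤ i → ¬ e ∣ N := by
  intro fuel
  induction fuel with
  | zero => intro i hi hf; omega
  | succ fuel ih =>
    intro i hi hf
    simp only [loopDown]
    by_cases h : PySem.Int.mod N i = 0
    · have hdvd : i ∣ N := (PySem.Int.mod_eq_zero_iff_dvd N i).mp h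
      simp only [h, ne_eq, not_true_eq_false, if_false]
      exact ⟨i, rfl, hi, le_refl _, hdvd, fun e he1 he2 _ => by omega⟩
    · have hne : i ≠ 1 := by
        intro h1; subst h1
        exact h ((PySem.Int.mod_eq_zero_iff_dvd N 1).mpr (one_dvd N))
      have h2 : 1 ≤ i - 1 := by omega
      obtain ⟨d, hd, hd1, hd2, hd3, hd4⟩ := ih (i - 1) h2 (by omega)
      simp only [if_pos h]
      refine ⟨d, hd, hd1, by omega, hd3, ?_⟩
      intro e he1 he2 hedvd
      rcases eq_or_lt_of_le he2 with rfl | hlt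
      · exact h ((PySem.Int.mod_eq_zero_iff_dvd N e).mpr hedvd)
      · exact hd4 e he1 (by omega) hedvd

-- membership in A's list: exactly the pair-sums of the divisors j with i ≤ j ≤ m
theorem loopA_mem (N m : Int) (hm : 1 ≤ m) (hm1 : m * m ≤ N) (hm2 : N < (m + 1) * (m + 1)) :
    ∀ (fuel : Nat) (i : Int) (res : List Int) (x : Int), 1 ≤ i → (m + 1 - i).toNat ≤ fuel →
    (x ∈ loopAimpl N fuel i res ↔
      x ∈ res ∨ ∃ j, i ≤ j ∧ j ≤ m ∧ j ∣ N ∧ x = PySem.Int.floordiv N j + j) := by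
  intro fuel
  induction fuel with
  | zero =>
    intro i res x hi hf
    have : m + 1 ≤ i := by omega
    simp only [loopAimpl]
    constructor
    · exact fun h => Or.inl h
    · rintro (h | ⟨j, hj1, hj2, _, _⟩)
      · exact h
      · omega
  | succ fuel ih =>
    intro i res x hi hf
    simp only [loopAimpl]
    by_cases hbig : i * i > N
    · have him : m < i := by
        by_contra hle
        push Not at hle
        nlinarith
      simp only [if_pos hbig]
      constructor
      · exact fun h => Or.inl h
      · rintro (h | ⟨j, hj1, hj2, _, _⟩)
        · exact h
        · omega
    · push Not at hbig
      have him : i ≤ m := by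
        have := pv_sq_lt (by omega : (0:Int) ≤ i) (by omega : (0:Int) ≤ m + 1) hbig hm2
        omega
      simp only [if_neg (by omega : ¬ i * i > N)]
      by_cases hmod : PySem.Int.mod N i = 0
      · have hdvd : i ∣ N := (PySem.Int.mod_eq_zero_iff_dvd N i).mp hmod
        simp only [hmod, ne_eq, not_true_eq_false, if_false]
        rw [ih (i + 1) (res ++ [PySem.Int.floordiv N i + i]) x (by omega) (by omega)]
        simp only [List.mem_append, List.mem_singleton]
        constructor
        · rintro ((h | h) | ⟨j, hj1, hj2, hj3, hj4⟩)
          · exact Or.inl h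
          · exact Or.inr ⟨i, le_refl _, him, hdvd, h⟩
          · exact Or.inr ⟨j, by omega, hj2, hj3, hj4⟩
        · rintro (h | ⟨j, hj1, hj2, hj3, hj4⟩)
          · exact Or.inl (Or.inl h)
          · rcases eq_or_lt_of_le hj1 with rfl | hlt
            · exact Or.inl (Or.inr hj4)
            · exact Or.inr ⟨j, by omega, hj2, hj3, hj4⟩
      · have hndvd : ¬ i ∣ N := fun hc => hmod ((PySem.Int.mod_eq_zero_iff_dvd N i).mpr hc)
        simp only [if_pos hmod]
        rw [ih (i + 1) res x (by omega) (by omega)]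
        constructor
        · rintro (h | ⟨j, hj1, hj2, hj3, hj4⟩)
          · exact Or.inl h
          · exact Or.inr ⟨j, by omega, hj2, hj3, hj4⟩
        · rintro (h | ⟨j, hj1, hj2, hj3, hj4⟩)
          · exact Or.inl h
          · rcases eq_or_lt_of_le hj1 with rfl | hlt
            · exact absurd hj3 hndvd
            · exact Or.inr ⟨j, by omega, hj2, hj3, hj4⟩

-- the pair-sum is antitone in the divisor below the root:
-- for divisors i ≤ d with i*d ≤ N, d + N/d ≤ i + N/i
theorem pv_mono (N i d : Int) (hi : 1 ≤ i) (hid : i ≤ d) (hdi : i ∣ N) (hdd : d ∣ N)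
    (hprod : i * d ≤ N) : d + N / d ≤ i + N / i := by
  obtain ⟨a, ha⟩ := hdi
  obtain ⟨b, hb⟩ := hdd
  have hi0 : i ≠ 0 := by omega
  have hd0 : d ≠ 0 := by omega
  have hNi : N / i = a := by rw [ha]; exact Int.mul_ediv_cancel_left a hi0
  have hNd : N / d = b := by rw [hb]; exact Int.mul_ediv_cancel_left b hd0
  rw [hNi, hNd]
  nlinarith [mul_pos (by omega : (0:Int) < i) (by omega : (0:Int) < d)]

-- ===== VERDICT (by name: the statement is the Claim_ definition above) =====
theorem divisors_sum_spec : Claim_equal_divisors_sum := by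
  intro N _ hN
  have hN' : (1:Int) ≤ N := hN
  unfold Spec_divisors_sum divisors_sum divisors_sum_alt
  -- the root: r = loopUp …, m = r - 1 = floor(sqrt N)
  obtain ⟨hr1, hr2, hr3⟩ := loopUp_spec N (N + 1).toNat 1 (by omega) (by omega)
  set r := loopUp N (N + 1).toNat 1 with hrdef
  have hm1 : 1 ≤ r - 1 := by
    by_contra h
    have : r = 1 := by omega
    rw [this] at hr2; omega
  have hmsq : (r - 1) * (r - 1) ≤ N := hr3 (r - 1) (by omega) (by omega)
  have hmsq2 : N < (r - 1 + 1) * (r - 1 + 1) := by simpa using hr2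
  -- B's value: the largest divisor d ≤ r - 1
  obtain ⟨d, hd, hd1, hd2, hd3, hd4⟩ :=
    loopDown_spec N (r - 1).toNat (r - 1) hm1 (le_refl _)
  simp only []
  rw [hd]
  -- A's list
  have hmN : r - 1 ≤ N := by nlinarith
  have hfuel : ((r - 1) + 1 - 1).toNat ≤ N.toNat := by omega
  have hmem := fun x => loopA_mem N (r - 1) hm1 hmsq hmsq2 N.toNat 1 [] x (by omega) hfuel
  -- v := A's copy of the pair-sum at d
  have hdfd : PySem.Int.floordiv N d = N / d :=
    PySem.Int.floordiv_eq_ediv_of_pos (by omega)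
  have hvmem : (PySem.Int.floordiv N d + d) ∈ loopAimpl N N.toNat 1 [] := by
    rw [hmem _]
    exact Or.inr ⟨d, hd1, hd2, hd3, rfl⟩
  -- every element of the list dominates it
  have hdom : ∀ x ∈ loopAimpl N N.toNat 1 [],
      PySem.Int.floordiv N d + d ≤ x := by
    intro x hx
    rw [hmem _] at hx
    rcases hx with h | ⟨j, hj1, hj2, hj3, hj4⟩
    · simp at h
    · have hjd : j ≤ d := by
        by_contra hgt
        push Not at hgt
        exact hd4 j hgt hj2 hj3
      have hjfd : PySem.Int.floordiv N j = N / j :=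
        PySem.Int.floordiv_eq_ediv_of_pos (by omega)
      have := pv_mono N j d hj1 hjd hj3 hd3 (by nlinarith)
      rw [hj4, hjfd, hdfd]; omega
  -- hence Python's min picks exactly that value
  obtain ⟨w, hw⟩ : ∃ w, PySem.List.min? (loopAimpl N N.toNat 1 []) (fun x => x) = some w := by
    cases hcase : PySem.List.min? (loopAimpl N N.toNat 1 []) (fun x => x) with
    | none =>
      rw [PySem.List.min?_eq_none_iff] at hcase
      rw [hcase] at hvmem
      simp at hvmem
    | some w => exact ⟨w, rfl⟩
  have hwmem := PySem.List.min?_mem hw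
  have hwmin := PySem.List.min?_isMin hw _ hvmem
  have hwge := hdom w hwmem
  rw [hw]
  simp only [Option.getD_some]
  omega
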